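-- pv_equiv track=rewrite | github.com/kcerauno/voynich_grammer_analysis | src/analyze_slot_grammar_v5.py | parse_greedy
-- ===== SOURCE A (Python) =====
-- SLOTS_V4 = [
--     ["l", "r", "o", "y", "s"],                          # Slot 0
--     ["q", "s", "d", "x", "l", "r", "h"],               # Slot 1
--     ["o", "y"],                                           # Slot 2
--     ["d", "r"],                                           # Slot 3
--     ["t", "k", "p", "f"],                                # Slot 4
--     ["ch", "sh"],                                         # Slot 5
--     ["cth", "ckh", "cph", "cfh"],                        # Slot 6
--     ["eee", "ee", "e", "g"],                             # Slot 7
--     ["k", "t", "p", "f", "ch", "sh", "l", "r", "o", "y"],  # Slot 8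
--     ["s", "d", "c"],                                      # Slot 9
--     ["o", "a", "y"],                                      # Slot 10
--     ["iii", "ii", "i"],                                   # Slot 11
--     ["d", "l", "r", "m", "n"],                           # Slot 12
--     ["s"],                                                # Slot 13
--     ["y"],                                                # Slot 14
--     ["k", "t", "p", "f", "l", "r", "o", "y"],           # Slot 15
-- ]
--
-- def parse_greedy(word: str) -> tuple[list, str]:
--     pos = 0
--     matched = []
--     for idx, options in enumerate(SLOTS_V4):
--         if pos >= len(word):
--             break
--         for opt in options:
--             if word.startswith(opt, pos):
--                 matched.append((idx, opt))
--                 pos += len(opt)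
--                 break
--     return matched, word[pos:]
-- ===== SOURCE B (Python) =====
-- SLOTS_V4 = [
--     ["l", "r", "o", "y", "s"],                          # Slot 0
--     ["q", "s", "d", "x", "l", "r", "h"],               # Slot 1
--     ["o", "y"],                                           # Slot 2
--     ["d", "r"],                                           # Slot 3
--     ["t", "k", "p", "f"],                                # Slot 4
--     ["ch", "sh"],                                         # Slot 5
--     ["cth", "ckh", "cph", "cfh"],                        # Slot 6
--     ["eee", "ee", "e", "g"],                             # Slot 7
--     ["k", "t", "p", "f", "ch", "sh", "l", "r", "o", "y"],  # Slot 8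
--     ["s", "d", "c"],                                      # Slot 9
--     ["o", "a", "y"],                                      # Slot 10
--     ["iii", "ii", "i"],                                   # Slot 11
--     ["d", "l", "r", "m", "n"],                           # Slot 12
--     ["s"],                                                # Slot 13
--     ["y"],                                                # Slot 14
--     ["k", "t", "p", "f", "l", "r", "o", "y"],           # Slot 15
-- ]
--
-- def parse_greedy(word: str) -> tuple[list, str]:
--     def go(idx, rest):
--         if idx == len(SLOTS_V4) or not rest:
--             return [], rest
--         opt = next((o for o in SLOTS_V4[idx] if rest.startswith(o)), None)
--         if opt is None:
--             return go(idx + 1, rest)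
--         matched, leftover = go(idx + 1, rest[len(opt):])
--         return [(idx, opt)] + matched, leftover
--     return go(0, word)
-- ===== Notes on version B (the rewrite author's own statement) =====
-- stated objective: alternative
-- what changed: Replaces the mutable position pointer + accumulator loop (with break) by a pure recursion over slot indices that threads the remaining suffix string and builds the match list back-to-front by consing.
import Mathlib
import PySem

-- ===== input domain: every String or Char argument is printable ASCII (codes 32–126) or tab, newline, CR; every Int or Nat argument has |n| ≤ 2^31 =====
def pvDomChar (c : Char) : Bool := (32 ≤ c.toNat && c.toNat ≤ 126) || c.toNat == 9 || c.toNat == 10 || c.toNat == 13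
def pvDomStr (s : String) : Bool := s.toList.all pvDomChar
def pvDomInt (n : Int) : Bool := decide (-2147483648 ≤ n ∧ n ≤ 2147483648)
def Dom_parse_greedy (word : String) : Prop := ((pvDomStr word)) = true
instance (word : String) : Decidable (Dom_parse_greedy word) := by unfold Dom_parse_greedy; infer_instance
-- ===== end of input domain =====

-- B replaces A's mutable position/accumulator loop by a pure recursion on slots threading the
-- remaining suffix, building the result by consing (objective: alternative decomposition, same cost).

-- ===== PORT A =====
-- module constant SLOTS_V4
def slotsV4 : List (List String) :=
  [["l", "r", "o", "y", "s"],
   ["q", "s", "d", "x", "l", "r", "h"],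
   ["o", "y"],
   ["d", "r"],
   ["t", "k", "p", "f"],
   ["ch", "sh"],
   ["cth", "ckh", "cph", "cfh"],
   ["eee", "ee", "e", "g"],
   ["k", "t", "p", "f", "ch", "sh", "l", "r", "o", "y"],
   ["s", "d", "c"],
   ["o", "a", "y"],
   ["iii", "ii", "i"],
   ["d", "l", "r", "m", "n"],
   ["s"],
   ["y"],
   ["k", "t", "p", "f", "l", "r", "o", "y"]]

-- inner 'for opt in options: if word.startswith(opt, pos): … break' (0 ≤ pos ≤ len word here,
-- so startswith(opt, pos) is exactly 'opt is a prefix of the suffix at pos')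
def aInner (options : List String) (w : List Char) (pos : Nat) : Option String :=
  match options with
  | [] => none
  | o :: rest =>
    if o.toList.isPrefixOf (w.drop pos) then some o else aInner rest w pos

-- outer 'for idx, options in enumerate(SLOTS_V4)' with early break on pos >= len(word),
-- state (matched, pos)
def aLoop (slots : List (List String)) (idx : Nat) (w : List Char) (pos : Nat)
    (acc : List (Int × String)) : (List (Int × String)) × Nat :=
  match slots with
  | [] => (acc, pos)
  | options :: rest =>
    if pos ≥ w.length then (acc, pos)
    else
      match aInner options w pos with
      | some o => aLoop rest (idx + 1) w (pos + o.toList.length) (acc ++ [((idx : Int), o)])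
      | none => aLoop rest (idx + 1) w pos acc

def parse_greedy (word : String) : (List (Int × String)) × String :=
  let w := word.toList
  let r := aLoop slotsV4 0 w 0 []
  (r.1, String.ofList (w.drop r.2))   -- word[pos:] with 0 ≤ pos ≤ len(word)

-- ===== PORT B =====
-- 'next((o for o in SLOTS_V4[idx] if rest.startswith(o)), None)'
def bFirst (options : List String) (rest : List Char) : Option String :=
  options.find? (fun o => o.toList.isPrefixOf rest)

-- recursive 'go(idx, rest)': recursion over the slot list, threading the remaining suffix
def bGo (slots : List (List String)) (idx : Nat) (rest : List Char) :
    (List (Int × String)) × List Char :=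
  match slots with
  | [] => ([], rest)
  | options :: tl =>
    if rest = [] then ([], rest)
    else
      match bFirst options rest with
      | none => bGo tl (idx + 1) rest
      | some o =>
        let r := bGo tl (idx + 1) (rest.drop o.toList.length)
        (((idx : Int), o) :: r.1, r.2)

def parse_greedy_alt (word : String) : (List (Int × String)) × String :=
  let r := bGo slotsV4 0 word.toList
  (r.1, String.ofList r.2)

-- ===== PRECONDITION & SPEC =====
def Spec_parse_greedy (word : String) (out : (List (Int × String)) × String) : Prop := out = parse_greedy_alt word
instance (word : String) (out : (List (Int × String)) × String) : Decidable (Spec_parse_greedy word out) := by unfold Spec_parse_greedy; infer_instance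

-- ===== CLAIM (what is proved, stated in full; the proofs are below) =====
def Claim_equal_parse_greedy : Prop := ∀ (word : String), Dom_parse_greedy word → Spec_parse_greedy word (parse_greedy word)

-- ===== LEMMAS AND PROOFS =====

theorem aInner_eq_bFirst (options : List String) (w : List Char) (pos : Nat) :
    aInner options w pos = bFirst options (w.drop pos) := by
  induction options with
  | nil => rfl
  | cons o rest ih =>
    simp only [aInner, bFirst, List.find?]
    by_cases h : o.toList.isPrefixOf (w.drop pos) <;> simp [h, ih, bFirst]

theorem aLoop_eq_bGo (slots : List (List String)) (idx : Nat) (w : List Char) (pos : Nat)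
    (acc : List (Int × String)) (hpos : pos ≤ w.length) :
    (aLoop slots idx w pos acc).1 = acc ++ (bGo slots idx (w.drop pos)).1 ∧
    w.drop (aLoop slots idx w pos acc).2 = (bGo slots idx (w.drop pos)).2 ∧
    (aLoop slots idx w pos acc).2 ≤ w.length := by
  induction slots generalizing idx pos acc with
  | nil => simp [aLoop, bGo, hpos]
  | cons options tl ih =>
    by_cases hend : pos ≥ w.length
    · have hpe : pos = w.length := le_antisymm hpos hend
      have hrest : w.drop pos = [] := by simp [hpe]
      simp [aLoop, bGo, hpe]
    · have hrest : w.drop pos ≠ [] := by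
        simp only [ne_eq, List.drop_eq_nil_iff]
        omega
      rcases hfind : aInner options w pos with _ | o
      · have hb : bFirst options (w.drop pos) = none := by
          rw [← aInner_eq_bFirst]; exact hfind
        simp only [aLoop, bGo, hend, if_neg hrest, hfind, hb]
        exact ih (idx + 1) pos acc hpos
      · have hb : bFirst options (w.drop pos) = some o := by
          rw [← aInner_eq_bFirst]; exact hfind
        -- the matched option is a prefix of the suffix, so pos + |o| ≤ |w|
        have hpref : o.toList.isPrefixOf (w.drop pos) = true := by
          have hb2 : List.find? (fun s => s.toList.isPrefixOf (w.drop pos)) options = some o := hb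
          simpa using List.find?_some hb2
        have hlen : o.toList.length ≤ (w.drop pos).length :=
          List.IsPrefix.length_le (List.isPrefixOf_iff_prefix.mp hpref)
        have hlen' : pos + o.toList.length ≤ w.length := by
          simp only [List.length_drop] at hlen; omega
        have hdd : w.drop (pos + o.toList.length) = (w.drop pos).drop o.toList.length := by
          rw [List.drop_drop]; try ring_nf
        obtain ⟨h1, h2, h3⟩ := ih (idx + 1) (pos + o.toList.length) (acc ++ [((idx : Int), o)]) hlen'
        simp only [aLoop, bGo, if_neg hend, if_neg hrest, hfind, hb]
        refine ⟨?_, ?_, h3⟩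
        · rw [h1, hdd]; simp
        · rw [h2, hdd]

-- ===== VERDICT (by name: the statement is the Claim_ definition above) =====
theorem parse_greedy_spec : Claim_equal_parse_greedy := by
  intro word _
  unfold Spec_parse_greedy parse_greedy parse_greedy_alt
  obtain ⟨h1, h2, _⟩ := aLoop_eq_bGo slotsV4 0 word.toList 0 [] (Nat.zero_le _)
  simp only [List.drop_zero] at h1 h2
  simp [h1, h2]
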